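-- pv_equiv track=rewrite | github.com/mruckman1/voynich | src/voynich/modules/phase11/phonetic_skeletonizer.py | get_skeleton
-- ===== SOURCE A (Python) =====
-- VOYNICH_CONSONANT_CLASSES = {
--     'k': 'K', 't': 'T', 'p': 'P', 'f': 'P',
--     'ch': 'K', 'c': 'K', 'sh': 'S', 's': 'S',
--     'l': 'L', 'r': 'R', 'm': 'M', 'n': 'N', 'in': 'N', 'iin': 'N',
--     'd': 'T', 'ck': 'K', 'ct': 'T'
-- }
--
-- def get_skeleton(v_stem: str) -> str:
--     skeleton = []
--     i = 0
--     while i < len(v_stem):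
--         if i < len(v_stem) - 1 and v_stem[i:i+2] in VOYNICH_CONSONANT_CLASSES:
--             skeleton.append(VOYNICH_CONSONANT_CLASSES[v_stem[i:i+2]])
--             i += 2
--         elif v_stem[i] in VOYNICH_CONSONANT_CLASSES:
--             skeleton.append(VOYNICH_CONSONANT_CLASSES[v_stem[i]])
--             i += 1
--         else:
--             i += 1
--     return '-'.join(skeleton)
-- ===== SOURCE B (Python) =====
-- def _pair(a, b):
--     if b == 'h':
--         if a == 'c':
--             return 'K'
--         if a == 's':
--             return 'S'
--     elif a == 'c':
--         if b == 'k':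
--             return 'K'
--         if b == 't':
--             return 'T'
--     elif a == 'i' and b == 'n':
--         return 'N'
--     return None
--
--
-- def _single(c):
--     for k, v in zip('ktpfcslrmnd', 'KTPPKSLRMNT'):
--         if c == k:
--             return v
--     return None
--
--
-- def get_skeleton(v_stem: str) -> str:
--     out = []
--     stack = list(v_stem)
--     stack.reverse()
--     while stack:
--         a = stack.pop()
--         cls = _pair(a, stack[-1]) if stack else None
--         if cls is not None:
--             stack.pop()
--         else:
--             cls = _single(a)
--         if cls is not None:
--             out.append(cls)
--     return '-'.join(out)
-- ===== Notes on version B (the rewrite author's own statement) =====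
-- stated objective: alternative
-- what changed: Replaces A's index-arithmetic while loop with dict membership tests on string slices by a stack-pop tokenizer (pop one char, peek/pop a second) classified by an explicit two-char branch function and a parallel-string table for single chars, with no dictionary and no slicing.
import Mathlib
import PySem

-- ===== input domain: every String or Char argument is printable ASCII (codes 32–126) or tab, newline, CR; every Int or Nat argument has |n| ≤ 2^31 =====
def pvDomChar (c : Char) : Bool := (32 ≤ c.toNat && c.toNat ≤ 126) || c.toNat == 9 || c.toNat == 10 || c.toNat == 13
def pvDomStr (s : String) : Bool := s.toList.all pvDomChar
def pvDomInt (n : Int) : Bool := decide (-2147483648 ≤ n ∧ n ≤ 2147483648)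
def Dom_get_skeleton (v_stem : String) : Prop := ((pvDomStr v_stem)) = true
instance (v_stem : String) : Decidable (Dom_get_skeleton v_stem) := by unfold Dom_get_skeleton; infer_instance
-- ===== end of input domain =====

-- B replaces A's index/slice loop with dict lookups by a stack-pop tokenizer with
-- explicit branch/table classifiers (objective: alternative decomposition, same cost).

-- ===== PORT A =====
def VCC : PySem.Dict (List Char) String := PySem.Dict.ofList
  [ (['k'], "K"), (['t'], "T"), (['p'], "P"), (['f'], "P"),
    (['c','h'], "K"), (['c'], "K"), (['s','h'], "S"), (['s'], "S"),
    (['l'], "L"), (['r'], "R"), (['m'], "M"), (['n'], "N"),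
    (['i','n'], "N"), (['i','i','n'], "N"),
    (['d'], "T"), (['c','k'], "K"), (['c','t'], "T") ]

-- the while loop of A: i advances by 1 or 2; slicing and indexing as in the Python
def loopA (s : List Char) (i : Nat) : List String :=
  if h : i < s.length then
    let two := PySem.List.slice s (some (i : Int)) (some ((i : Int) + 2))
    if i + 1 < s.length ∧ (VCC.get? two).isSome then
      (VCC.get? two).getD "" :: loopA s (i + 2)
    else
      match VCC.get? [s[i]] with
      | some v => v :: loopA s (i + 1)
      | none => loopA s (i + 1)
  else []
termination_by s.length - i

def get_skeleton (v_stem : String) : String :=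
  PySem.Str.join "-" (loopA v_stem.toList 0)

-- ===== PORT B =====
def pairClass (a b : Char) : Option String :=
  if b = 'h' then
    (if a = 'c' then some "K" else if a = 's' then some "S" else none)
  else if a = 'c' then
    (if b = 'k' then some "K" else if b = 't' then some "T" else none)
  else if a = 'i' ∧ b = 'n' then some "N"
  else none

def singleTable : List (Char × String) :=
  List.zip ['k','t','p','f','c','s','l','r','m','n','d']
           ["K","T","P","P","K","S","L","R","M","N","T"]

def singleClass (c : Char) : Option String :=
  (singleTable.find? (fun p => c == p.1)).map (·.2)

-- the stack loop of B: pop one char, peek (and maybe pop) a second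
def goB : List Char → List String
  | [] => []
  | a :: rest =>
    match rest with
    | [] =>
      match singleClass a with
      | some v => [v]
      | none => []
    | b :: rest2 =>
      match pairClass a b with
      | some v => v :: goB rest2
      | none =>
        match singleClass a with
        | some v => v :: goB (b :: rest2)
        | none => goB (b :: rest2)

def get_skeleton_alt (v_stem : String) : String :=
  PySem.Str.join "-" (goB v_stem.toList)

-- ===== PRECONDITION & SPEC =====
def Spec_get_skeleton (v_stem : String) (out : String) : Prop := out = get_skeleton_alt v_stem
instance (v_stem : String) (out : String) : Decidable (Spec_get_skeleton v_stem out) := by unfold Spec_get_skeleton; infer_instance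

-- ===== CLAIM (what is proved, stated in full; the proofs are below) =====
def Claim_equal_get_skeleton : Prop := ∀ (v_stem : String), Dom_get_skeleton v_stem → Spec_get_skeleton v_stem (get_skeleton v_stem)

-- ===== LEMMAS AND PROOFS =====

-- the literal dict, spelled as its item list (for the lookup lemmas below)
theorem VCC_mk : VCC = PySem.Dict.mk
    [ (['k'], "K"), (['t'], "T"), (['p'], "P"), (['f'], "P"),
      (['c','h'], "K"), (['c'], "K"), (['s','h'], "S"), (['s'], "S"),
      (['l'], "L"), (['r'], "R"), (['m'], "M"), (['n'], "N"),
      (['i','n'], "N"), (['i','i','n'], "N"),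
      (['d'], "T"), (['c','k'], "K"), (['c','t'], "T") ] := by decide

-- A's dict lookup on a 2-char slice agrees with B's pairClass
set_option maxRecDepth 4000 in
theorem get2_eq (a b : Char) : VCC.get? [a, b] = pairClass a b := by
  rw [VCC_mk]
  simp only [PySem.Dict.get?_mk_cons]
  by_cases hb : b = 'h' <;> by_cases hac : a = 'c' <;> by_cases has : a = 's' <;>
    by_cases hai : a = 'i' <;> by_cases hbk : b = 'k' <;> by_cases hbt : b = 't' <;>
    by_cases hbn : b = 'n' <;> simp_all [pairClass, PySem.Dict.get?, @eq_comm Char]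

-- A's dict lookup on a 1-char string agrees with B's singleClass
set_option maxRecDepth 4000 in
theorem get1_eq (a : Char) : VCC.get? [a] = singleClass a := by
  rw [VCC_mk]
  by_cases h1 : a = 'k'; · subst h1; decide
  by_cases h2 : a = 't'; · subst h2; decide
  by_cases h3 : a = 'p'; · subst h3; decide
  by_cases h4 : a = 'f'; · subst h4; decide
  by_cases h5 : a = 'c'; · subst h5; decide
  by_cases h6 : a = 's'; · subst h6; decide
  by_cases h7 : a = 'l'; · subst h7; decide
  by_cases h8 : a = 'r'; · subst h8; decide
  by_cases h9 : a = 'm'; · subst h9; decide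
  by_cases h10 : a = 'n'; · subst h10; decide
  by_cases h11 : a = 'd'; · subst h11; decide
  have hL : (PySem.Dict.mk
    [ (['k'], "K"), (['t'], "T"), (['p'], "P"), (['f'], "P"),
      (['c','h'], "K"), (['c'], "K"), (['s','h'], "S"), (['s'], "S"),
      (['l'], "L"), (['r'], "R"), (['m'], "M"), (['n'], "N"),
      (['i','n'], "N"), (['i','i','n'], "N"),
      (['d'], "T"), (['c','k'], "K"), (['c','t'], "T") ]).get? [a] = none := by
    rw [PySem.Dict.get?_eq_none_iff_not_mem_keys]
    intro hmem
    simp [PySem.Dict.keys] at hmem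
    rcases hmem with h|h|h|h|h|h|h|h|h|h|h <;> simp_all
  have hR : singleClass a = none := by
    simp only [singleClass, singleTable, Option.map_eq_none_iff, List.find?_eq_none]
    intro p hp
    simp at hp
    rcases hp with h|h|h|h|h|h|h|h|h|h|h <;> simp_all
  rw [hL, hR]

-- the slice s[i:i+2] is the two-element take of the drop
theorem slice_two (s : List Char) (i : Nat) :
    PySem.List.slice s (some (i : Int)) (some ((i : Int) + 2)) = (s.drop i).take 2 := by
  have h2 : ((i : Int) + 2) = ((i + 2 : Nat) : Int) := by push_cast; ring
  rw [h2, PySem.List.slice_natCast]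
  congr 1
  omega

theorem loopA_eq_goB (s : List Char) (i : Nat) : loopA s i = goB (s.drop i) := by
  fun_induction loopA s i with
  | case1 i h two hcond ih =>
    obtain ⟨h1, h2⟩ := hcond
    have hd1 : s.drop i = s[i] :: s.drop (i + 1) := List.drop_eq_getElem_cons h
    have hd2 : s.drop (i + 1) = s[i + 1] :: s.drop (i + 2) := List.drop_eq_getElem_cons h1
    have htwo : two = [s[i], s[i + 1]] := by
      show PySem.List.slice s (some (i : Int)) (some ((i : Int) + 2)) = _
      rw [slice_two, hd1, hd2]; rfl
    obtain ⟨v, hv⟩ := Option.isSome_iff_exists.mp h2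
    have hp : pairClass s[i] s[i + 1] = some v := by rw [← get2_eq, ← htwo]; exact hv
    rw [hd1, hd2]
    show (VCC.get? two).getD "" :: loopA s (i + 2) = _
    rw [hv]
    simp [goB, hp, ih]
  | case2 i h two hcond v hv ih =>
    have hd1 : s.drop i = s[i] :: s.drop (i + 1) := List.drop_eq_getElem_cons h
    have hs : singleClass s[i] = some v := by rw [← get1_eq]; exact hv
    rw [hd1]
    by_cases hlt : i + 1 < s.length
    · have hd2 : s.drop (i + 1) = s[i + 1] :: s.drop (i + 2) := List.drop_eq_getElem_cons hlt
      have htwo : two = [s[i], s[i + 1]] := by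
        show PySem.List.slice s (some (i : Int)) (some ((i : Int) + 2)) = _
        rw [slice_two, hd1, hd2]; rfl
      have hp : pairClass s[i] s[i + 1] = none := by
        rw [← get2_eq, ← htwo]
        rcases hq : VCC.get? two with _ | w
        · rfl
        · exact absurd ⟨hlt, by rw [hq]; rfl⟩ hcond
      rw [hd2]
      simp [goB, hp, hs, ih, ← hd2]
    · have hnil : s.drop (i + 1) = [] := List.drop_eq_nil_of_le (by omega)
      rw [hnil]
      simp [goB, hs, ih, hnil]
  | case3 i h two hcond hv ih =>
    have hd1 : s.drop i = s[i] :: s.drop (i + 1) := List.drop_eq_getElem_cons h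
    have hs : singleClass s[i] = none := by rw [← get1_eq]; exact hv
    rw [hd1]
    by_cases hlt : i + 1 < s.length
    · have hd2 : s.drop (i + 1) = s[i + 1] :: s.drop (i + 2) := List.drop_eq_getElem_cons hlt
      have htwo : two = [s[i], s[i + 1]] := by
        show PySem.List.slice s (some (i : Int)) (some ((i : Int) + 2)) = _
        rw [slice_two, hd1, hd2]; rfl
      have hp : pairClass s[i] s[i + 1] = none := by
        rw [← get2_eq, ← htwo]
        rcases hq : VCC.get? two with _ | w
        · rfl
        · exact absurd ⟨hlt, by rw [hq]; rfl⟩ hcond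
      rw [hd2]
      simp [goB, hp, hs, ih, ← hd2]
    · have hnil : s.drop (i + 1) = [] := List.drop_eq_nil_of_le (by omega)
      rw [hnil]
      simp [goB, hs, ih, hnil]
  | case4 i h =>
    rw [List.drop_eq_nil_of_le (by omega)]
    rfl

-- ===== VERDICT (by name: the statement is the Claim_ definition above) =====
theorem get_skeleton_spec : Claim_equal_get_skeleton := by
  intro v _
  unfold Spec_get_skeleton get_skeleton get_skeleton_alt
  rw [loopA_eq_goB, List.drop_zero]
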